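-- pv_equiv track=rewrite | github.com/nel-eleven11/Generador_Analizador_Lexico | readYalex.py | remove_useless_quotes
-- ===== SOURCE A (Python) =====
-- def remove_useless_quotes(expr):
--     """
--     Recorre la expresión expr y elimina las comillas simples o dobles que encierran
--     un contenido sin propósito, es decir, convierte 'a' o "a" en a.
--     """
--     result = ""
--     i = 0
--     while i < len(expr):
--         if expr[i] in ["'", '"']:
--             quote = expr[i]
--             i += 1
--             temp = ""
--             while i < len(expr) and expr[i] != quote:
--                 temp += expr[i]
--                 i += 1
--             if i < len(expr) and expr[i] == quote:
--                 i += 1  # saltar comilla de cierre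
--             result += temp
--         else:
--             result += expr[i]
--             i += 1
--     return result
-- ===== SOURCE B (Python) =====
-- def remove_useless_quotes(expr):
--     out = []
--     quote = None
--     for c in expr:
--         if quote is None:
--             if c == "'" or c == '"':
--                 quote = c
--             else:
--                 out.append(c)
--         elif c == quote:
--             quote = None
--         else:
--             out.append(c)
--     return "".join(out)
-- ===== Notes on version B (the rewrite author's own statement) =====
-- stated objective: idiomatic
-- what changed: Replaces the nested index-driven while loops (inner scan to the closing quote with manual index bookkeeping) by a single flat for-loop state machine carrying the currently open quote character, appending to a list joined once at the end.
import Mathlib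
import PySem

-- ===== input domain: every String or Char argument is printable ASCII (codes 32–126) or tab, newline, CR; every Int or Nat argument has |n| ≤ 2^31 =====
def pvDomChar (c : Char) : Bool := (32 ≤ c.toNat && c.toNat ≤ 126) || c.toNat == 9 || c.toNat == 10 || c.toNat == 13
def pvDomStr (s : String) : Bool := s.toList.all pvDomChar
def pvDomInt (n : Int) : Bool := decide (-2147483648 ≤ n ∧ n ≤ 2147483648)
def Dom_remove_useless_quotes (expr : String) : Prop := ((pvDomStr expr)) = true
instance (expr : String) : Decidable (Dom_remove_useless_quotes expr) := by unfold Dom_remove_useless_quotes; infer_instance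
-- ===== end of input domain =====

-- B replaces A's nested index-driven while loops by a single flat state-machine pass (objective: idiomatic).

-- ===== PORT A =====
-- inner while: collect chars until the matching quote; returns (temp, remaining input at the stop point)
def pvA_inner (q : Char) : List Char → List Char × List Char
  | [] => ([], [])
  | c :: rest =>
    if c = q then ([], c :: rest)
    else
      let p := pvA_inner q rest
      (c :: p.1, p.2)

theorem pvA_inner_len (q : Char) (l : List Char) : (pvA_inner q l).2.length ≤ l.length := by
  induction l with
  | nil => simp [pvA_inner]
  | cons c rest ih =>
    simp only [pvA_inner]
    split
    · simp
    · simpa using Nat.le_succ_of_le ih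

-- skip the closing quote if present (the 'if i < len and expr[i] == quote: i += 1' step)
def pvA_skipClose (q : Char) : List Char → List Char
  | c' :: r => if c' = q then r else c' :: r
  | [] => []

theorem pvA_skipClose_len (q : Char) (l : List Char) : (pvA_skipClose q l).length ≤ l.length := by
  cases l with
  | nil => simp [pvA_skipClose]
  | cons c' r => simp only [pvA_skipClose]; split <;> simp

-- outer while loop of A, carrying the result accumulator
def pvA_loop : List Char → List Char → List Char
  | [], result => result
  | c :: rest, result =>
    if c = '\'' ∨ c = '"' then
      let p := pvA_inner c rest
      pvA_loop (pvA_skipClose c p.2) (result ++ p.1)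
    else
      pvA_loop rest (result ++ [c])
termination_by l => l.length
decreasing_by
  · have h1 := pvA_skipClose_len c (pvA_inner c rest).2
    have h2 := pvA_inner_len c rest
    simp; omega
  · simp

def remove_useless_quotes (expr : String) : String :=
  String.mk (pvA_loop expr.toList [])

-- ===== PORT B =====
def pvB_step (st : Option Char × List Char) (c : Char) : Option Char × List Char :=
  match st.1 with
  | none => if c = '\'' ∨ c = '"' then (some c, st.2) else (none, st.2 ++ [c])
  | some q => if c = q then (none, st.2) else (some q, st.2 ++ [c])

def remove_useless_quotes_alt (expr : String) : String :=
  String.mk (expr.toList.foldl pvB_step (none, [])).2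

-- ===== PRECONDITION & SPEC =====
def Spec_remove_useless_quotes (expr : String) (out : String) : Prop := out = remove_useless_quotes_alt expr
instance (expr : String) (out : String) : Decidable (Spec_remove_useless_quotes expr out) := by unfold Spec_remove_useless_quotes; infer_instance

-- ===== CLAIM (what is proved, stated in full; the proofs are below) =====
def Claim_equal_remove_useless_quotes : Prop := ∀ (expr : String), Dom_remove_useless_quotes expr → Spec_remove_useless_quotes expr (remove_useless_quotes expr)

-- ===== LEMMAS AND PROOFS =====

-- functional model of the state machine
def pvModel : Option Char → List Char → List Char
  | _, [] => []
  | none, c :: r => if c = '\'' ∨ c = '"' then pvModel (some c) r else c :: pvModel none r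
  | some q, c :: r => if c = q then pvModel none r else c :: pvModel (some q) r

theorem pvB_foldl_model (l : List Char) (q : Option Char) (acc : List Char) :
    (l.foldl pvB_step (q, acc)).2 = acc ++ pvModel q l := by
  induction l generalizing q acc with
  | nil => simp [pvModel]
  | cons c r ih =>
    match q with
    | none =>
      simp only [List.foldl, pvB_step, pvModel]
      split <;> simp [ih]
    | some q' =>
      simp only [List.foldl, pvB_step, pvModel]
      split <;> simp [ih]

theorem pvModel_some (q : Char) (l : List Char) :
    pvModel (some q) l =
      (pvA_inner q l).1 ++ pvModel none (pvA_skipClose q (pvA_inner q l).2) := by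
  induction l with
  | nil => simp [pvA_inner, pvModel, pvA_skipClose]
  | cons c r ih =>
    simp only [pvA_inner, pvModel]
    by_cases h : c = q
    · simp [h, pvA_skipClose]
    · simp [h, ih]

theorem pvA_loop_model (n : ℕ) (l : List Char) (hn : l.length ≤ n) (res : List Char) :
    pvA_loop l res = res ++ pvModel none l := by
  induction n generalizing l res with
  | zero =>
    have : l = [] := List.eq_nil_of_length_eq_zero (Nat.le_zero.mp hn)
    subst this; simp [pvA_loop, pvModel]
  | succ n ih =>
    match l with
    | [] => simp [pvA_loop, pvModel]
    | c :: rest =>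
      simp only [pvA_loop, pvModel]
      by_cases hq : c = '\'' ∨ c = '"'
      · simp only [hq, if_true]
        have hlen := pvA_inner_len c rest
        have hskip := pvA_skipClose_len c (pvA_inner c rest).2
        have hrest : rest.length ≤ n := by simp at hn; omega
        rw [pvModel_some]
        rw [ih _ (by omega)]
        simp
      · simp only [hq, if_false]
        have hrest : rest.length ≤ n := by simp at hn; omega
        rw [ih rest hrest]
        simp

-- ===== VERDICT (by name: the statement is the Claim_ definition above) =====
theorem remove_useless_quotes_spec : Claim_equal_remove_useless_quotes := by
  intro expr _
  unfold Spec_remove_useless_quotes remove_useless_quotes remove_useless_quotes_alt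
  rw [pvA_loop_model expr.toList.length expr.toList (le_refl _) [],
      pvB_foldl_model]
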